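-- pv_equiv track=rewrite | github.com/julianjc84/KlippyLogAnalysis | klipper_log_analyzer.py | _detect_shutdown_reason
-- ===== SOURCE A (Python) =====
-- from typing import List, Dict, Optional, Tuple
--
-- def _detect_shutdown_reason(lines: List[str], end_line_index: int) -> Optional[str]:
--     """Detect why a session ended by examining lines before restart"""
--     # Check last 10 lines before restart
--     start_idx = max(0, end_line_index - 10)
--     relevant_lines = lines[start_idx:end_line_index + 1]
--
--     for line in reversed(relevant_lines):
--         if 'webhooks client' in line.lower() and 'disconnected' in line.lower():
--             return "User-initiated restart (webhooks disconnect)"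
--         elif 'mcu shutdown' in line.lower() or 'mcu \'mcu\' shutdown' in line.lower():
--             return "MCU shutdown (emergency stop or firmware error)"
--         elif 'received signal' in line.lower():
--             if 'sigterm' in line.lower():
--                 return "Terminated by system (SIGTERM)"
--             elif 'sigint' in line.lower():
--                 return "Interrupted by user (SIGINT/Ctrl+C)"
--             return "Received system signal"
--         elif 'command error' in line.lower() or 'internal error' in line.lower():
--             return "Klipper error triggered restart"
--         elif 'lost communication' in line.lower() or 'timeout' in line.lower():
--             return "Communication timeout"
--
--     return None
-- ===== SOURCE B (Python) =====
-- from typing import List, Optional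
--
-- def _classify(low: str) -> Optional[str]:
--     """Map one lowercased log line to its shutdown reason (priority order), or None."""
--     if 'webhooks client' in low and 'disconnected' in low:
--         return "User-initiated restart (webhooks disconnect)"
--     if 'mcu shutdown' in low or "mcu 'mcu' shutdown" in low:
--         return "MCU shutdown (emergency stop or firmware error)"
--     if 'received signal' in low:
--         if 'sigterm' in low:
--             return "Terminated by system (SIGTERM)"
--         if 'sigint' in low:
--             return "Interrupted by user (SIGINT/Ctrl+C)"
--         return "Received system signal"
--     if 'command error' in low or 'internal error' in low:
--         return "Klipper error triggered restart"
--     if 'lost communication' in low or 'timeout' in low: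
--         return "Communication timeout"
--     return None
--
-- def _detect_shutdown_reason(lines: List[str], end_line_index: int) -> Optional[str]:
--     # Forward pass over the window; the last matching line wins (equivalent to
--     # A's reversed scan returning the first match).
--     result = None
--     for line in lines[max(0, end_line_index - 10):end_line_index + 1]:
--         reason = _classify(line.lower())
--         if reason is not None:
--             result = reason
--     return result
-- ===== Notes on version B (the rewrite author's own statement) =====
-- stated objective: alternative
-- what changed: Instead of reversing the window and early-returning on the first matching line, B does a single forward pass keeping a last-match accumulator (the last matching line wins), classifying each line once on its lowercased form via a separate helper.
import Mathlib
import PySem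

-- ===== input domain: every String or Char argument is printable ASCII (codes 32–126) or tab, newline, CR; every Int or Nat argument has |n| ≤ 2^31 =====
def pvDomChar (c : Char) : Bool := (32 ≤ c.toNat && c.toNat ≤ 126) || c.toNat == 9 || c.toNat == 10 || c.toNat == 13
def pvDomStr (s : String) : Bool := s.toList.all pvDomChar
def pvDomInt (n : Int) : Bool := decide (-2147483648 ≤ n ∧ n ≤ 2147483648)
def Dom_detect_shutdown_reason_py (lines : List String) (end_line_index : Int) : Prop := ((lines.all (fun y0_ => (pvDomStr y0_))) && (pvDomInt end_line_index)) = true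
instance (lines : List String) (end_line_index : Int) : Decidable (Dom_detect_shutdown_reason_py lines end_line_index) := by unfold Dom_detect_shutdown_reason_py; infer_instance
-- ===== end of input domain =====

-- B replaces A's reversed scan with early return by a single forward pass keeping a
-- last-match accumulator (alternative decomposition); same return value everywhere.

-- ===== PORT A =====
-- the `for line in reversed(relevant_lines)` loop with early returns
def pvScanA : List String → Option String
  | [] => none
  | line :: rest =>
    if PySem.Str.isIn "webhooks client" (PySem.Str.lower line) && PySem.Str.isIn "disconnected" (PySem.Str.lower line) then
      some "User-initiated restart (webhooks disconnect)"
    else if PySem.Str.isIn "mcu shutdown" (PySem.Str.lower line) || PySem.Str.isIn "mcu 'mcu' shutdown" (PySem.Str.lower line) then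
      some "MCU shutdown (emergency stop or firmware error)"
    else if PySem.Str.isIn "received signal" (PySem.Str.lower line) then
      (if PySem.Str.isIn "sigterm" (PySem.Str.lower line) then
        some "Terminated by system (SIGTERM)"
      else if PySem.Str.isIn "sigint" (PySem.Str.lower line) then
        some "Interrupted by user (SIGINT/Ctrl+C)"
      else some "Received system signal")
    else if PySem.Str.isIn "command error" (PySem.Str.lower line) || PySem.Str.isIn "internal error" (PySem.Str.lower line) then
      some "Klipper error triggered restart"
    else if PySem.Str.isIn "lost communication" (PySem.Str.lower line) || PySem.Str.isIn "timeout" (PySem.Str.lower line) then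
      some "Communication timeout"
    else pvScanA rest

def detect_shutdown_reason_py (lines : List String) (end_line_index : Int) : Option String :=
  let start_idx := max 0 (end_line_index - 10)
  let relevant_lines := PySem.List.slice lines (some start_idx) (some (end_line_index + 1))
  pvScanA relevant_lines.reverse

-- ===== PORT B =====
-- classify one lowercased line (B's `_classify` helper)
def pvClassify (low : String) : Option String :=
  if PySem.Str.isIn "webhooks client" low && PySem.Str.isIn "disconnected" low then
    some "User-initiated restart (webhooks disconnect)"
  else if PySem.Str.isIn "mcu shutdown" low || PySem.Str.isIn "mcu 'mcu' shutdown" low then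
    some "MCU shutdown (emergency stop or firmware error)"
  else if PySem.Str.isIn "received signal" low then
    (if PySem.Str.isIn "sigterm" low then some "Terminated by system (SIGTERM)"
     else if PySem.Str.isIn "sigint" low then some "Interrupted by user (SIGINT/Ctrl+C)"
     else some "Received system signal")
  else if PySem.Str.isIn "command error" low || PySem.Str.isIn "internal error" low then
    some "Klipper error triggered restart"
  else if PySem.Str.isIn "lost communication" low || PySem.Str.isIn "timeout" low then
    some "Communication timeout"
  else none

-- forward pass with a last-match accumulator
def detect_shutdown_reason_py_alt (lines : List String) (end_line_index : Int) : Option String :=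
  (PySem.List.slice lines (some (max 0 (end_line_index - 10))) (some (end_line_index + 1))).foldl
    (fun result line =>
      match pvClassify (PySem.Str.lower line) with
      | some r => some r
      | none => result)
    none

-- ===== PRECONDITION & SPEC =====
def Spec_detect_shutdown_reason_py (lines : List String) (end_line_index : Int) (out : Option String) : Prop := out = detect_shutdown_reason_py_alt lines end_line_index
instance (lines : List String) (end_line_index : Int) (out : Option String) : Decidable (Spec_detect_shutdown_reason_py lines end_line_index out) := by unfold Spec_detect_shutdown_reason_py; infer_instance

-- ===== CLAIM (what is proved, stated in full; the proofs are below) =====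
def Claim_equal_detect_shutdown_reason_py : Prop := ∀ (lines : List String) (end_line_index : Int), Dom_detect_shutdown_reason_py lines end_line_index → Spec_detect_shutdown_reason_py lines end_line_index (detect_shutdown_reason_py lines end_line_index)

-- ===== LEMMAS AND PROOFS =====
-- A's reversed scan is findSome? of pvClassify∘lower over the reversed list.
theorem pvScanA_eq_findSome? (xs : List String) :
    pvScanA xs = xs.findSome? (fun line => pvClassify (PySem.Str.lower line)) := by
  induction xs with
  | nil => rfl
  | cons line rest ih =>
    rw [pvScanA, List.findSome?_cons, ih]
    unfold pvClassify
    generalize PySem.Str.isIn "webhooks client" (PySem.Str.lower line) = c1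
    generalize PySem.Str.isIn "disconnected" (PySem.Str.lower line) = c2
    generalize PySem.Str.isIn "mcu shutdown" (PySem.Str.lower line) = c3
    generalize PySem.Str.isIn "mcu 'mcu' shutdown" (PySem.Str.lower line) = c4
    generalize PySem.Str.isIn "received signal" (PySem.Str.lower line) = c5
    generalize PySem.Str.isIn "sigterm" (PySem.Str.lower line) = c6
    generalize PySem.Str.isIn "sigint" (PySem.Str.lower line) = c7
    generalize PySem.Str.isIn "command error" (PySem.Str.lower line) = c8
    generalize PySem.Str.isIn "internal error" (PySem.Str.lower line) = c9
    generalize PySem.Str.isIn "lost communication" (PySem.Str.lower line) = c10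
    generalize PySem.Str.isIn "timeout" (PySem.Str.lower line) = c11
    cases c1 <;> cases c2 <;> cases c3 <;> cases c4 <;> cases c5 <;> cases c6 <;>
      cases c7 <;> cases c8 <;> cases c9 <;> cases c10 <;> cases c11 <;> rfl

-- the forward fold with a last-match accumulator computes the first match of the reverse
theorem foldl_last_match (f : String → Option String) (xs : List String) :
    ∀ (acc : Option String),
      xs.foldl (fun result line => match f line with | some r => some r | none => result) acc
        = match xs.reverse.findSome? f with | some r => some r | none => acc := by
  induction xs with
  | nil => intro acc; rfl
  | cons line rest ih =>
    intro acc
    rw [List.foldl_cons, ih, List.reverse_cons, List.findSome?_append]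
    cases h : rest.reverse.findSome? f <;> cases h2 : f line <;>
      simp [h2]

-- ===== VERDICT (by name: the statement is the Claim_ definition above) =====
theorem detect_shutdown_reason_py_spec : Claim_equal_detect_shutdown_reason_py := by
  intro lines e _
  unfold Spec_detect_shutdown_reason_py detect_shutdown_reason_py detect_shutdown_reason_py_alt
  rw [pvScanA_eq_findSome?, foldl_last_match]
  cases (PySem.List.slice lines (some (max 0 (e - 10))) (some (e + 1))).reverse.findSome?
      (fun line => pvClassify (PySem.Str.lower line)) <;> rfl
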